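-- pv_equiv track=rewrite | github.com/keigimenez/TPSAYED1 | Tp4/ej9.py | ordenar_palabras_por_longitud
-- ===== SOURCE A (Python) =====
-- def ordenar_palabras_por_longitud(cadena):
--     partes = []
--     palabra = ""
--     for caracter in cadena:
--         if caracter.isalnum():
--             palabra += caracter
--         else:
--             if palabra:
--                 partes.append(palabra)
--                 palabra = ""
--             partes.append(caracter)
--     if palabra:
--         partes.append(palabra)
--
--     palabras = [parte for parte in partes if parte.isalnum()]
--     palabras_ordenadas = sorted(palabras, key=len)
--
--     resultado = []
--     palabra_index = 0
--     for parte in partes: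
--         if parte.isalnum():
--             resultado.append(palabras_ordenadas[palabra_index])
--             palabra_index += 1
--         else:
--             resultado.append(parte)
--     return ''.join(resultado)
-- ===== SOURCE B (Python) =====
-- def ordenar_palabras_por_longitud(cadena):
--     # group the string into maximal runs of equal isalnum() value, then
--     # hand the sorted words back out by consuming them as a queue
--     grupos = []
--     i, n = 0, len(cadena)
--     while i < n:
--         k = cadena[i].isalnum()
--         j = i + 1
--         while j < n and cadena[j].isalnum() == k:
--             j += 1
--         grupos.append((k, cadena[i:j]))
--         i = j
--     palabras = sorted((g for k, g in grupos if k), key=len)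
--     salida = []
--     for k, g in grupos:
--         if k:
--             salida.append(palabras.pop(0))
--         else:
--             salida.append(g)
--     return ''.join(salida)
-- ===== Notes on version B (the rewrite author's own statement) =====
-- stated objective: alternative
-- what changed: A accumulates a word character by character (flushing it and each separator char into a parts list) and reconstructs with an incrementing index into the sorted word list; B decomposes the string in one groupby-style pass into maximal runs of equal isalnum(), sorts the word runs by length, and reconstructs by consuming the sorted words as a queue (pop(0)), emitting separator runs verbatim.
import Mathlib
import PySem

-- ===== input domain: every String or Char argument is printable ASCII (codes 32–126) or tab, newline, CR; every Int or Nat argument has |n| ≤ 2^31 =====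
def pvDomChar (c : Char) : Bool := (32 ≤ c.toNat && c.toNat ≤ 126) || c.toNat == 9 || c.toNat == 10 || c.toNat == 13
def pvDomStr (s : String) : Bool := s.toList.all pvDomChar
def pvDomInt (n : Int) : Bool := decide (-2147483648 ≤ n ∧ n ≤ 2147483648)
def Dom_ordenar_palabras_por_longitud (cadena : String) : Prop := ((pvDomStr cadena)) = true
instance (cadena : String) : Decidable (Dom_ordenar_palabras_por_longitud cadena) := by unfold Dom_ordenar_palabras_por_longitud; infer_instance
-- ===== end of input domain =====

-- B replaces A's per-character accumulator and index-counter reconstruction by a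
-- groupby-style run decomposition plus queue consumption of the sorted words
-- (objective: alternative decomposition, same output, no speed claim).

-- ===== PORT A =====
-- phase 1 step: accumulate palabra, flush it (if nonempty) on a non-alnum char
def pvStepA (st : List (List Char) × List Char) (c : Char) : List (List Char) × List Char :=
  if PySem.Chars.isalnum c then (st.1, st.2 ++ [c])
  else ((if st.2 ≠ [] then st.1 ++ [st.2] else st.1) ++ [[c]], [])

def ordenar_palabras_por_longitud (cadena : String) : String :=
  let st := cadena.toList.foldl pvStepA ([], [])
  let partes := if st.2 ≠ [] then st.1 ++ [st.2] else st.1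
  let palabras := partes.filter (fun p => PySem.Chars.strIsalnum p)
  let palabras_ordenadas := PySem.List.sorted palabras (fun w => w.length) false
  -- palabras_ordenadas[palabra_index] is always in range in Python; `.getD []` is the unreachable IndexError branch
  let res := partes.foldl (fun (acc : List (List Char) × Nat) parte =>
      if PySem.Chars.strIsalnum parte then
        (acc.1 ++ [(PySem.List.pyGet? palabras_ordenadas (acc.2 : Int)).getD []], acc.2 + 1)
      else (acc.1 ++ [parte], acc.2)) ([], 0)
  String.ofList (PySem.Chars.join [] res.1)

-- ===== PORT B =====
-- Source B's outer while loop: maximal runs of equal isalnum(); the inner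
-- `while j < n and cadena[j].isalnum() == k` run extraction is takeWhile/dropWhile
def pvRuns (l : List Char) : List (Bool × List Char) :=
  match l with
  | [] => []
  | c :: rest =>
      let k := PySem.Chars.isalnum c
      (k, c :: rest.takeWhile (fun d => PySem.Chars.isalnum d == k)) ::
        pvRuns (rest.dropWhile (fun d => PySem.Chars.isalnum d == k))
termination_by l.length
decreasing_by
  simp only [List.length_cons]
  exact Nat.lt_succ_of_le (List.length_dropWhile_le _ _)

def ordenar_palabras_por_longitud_alt (cadena : String) : String :=
  let grupos := pvRuns cadena.toList
  let palabras := PySem.List.sorted ((grupos.filter (·.1)).map (·.2)) (fun w => w.length) false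
  -- `palabras.pop(0)`: queue consumption; the `[]` branch is Python's unreachable IndexError
  let salida := grupos.foldl (fun (st : List (List Char) × List (List Char)) g =>
      if g.1 then
        match st.2 with
        | w :: ws => (st.1 ++ [w], ws)
        | [] => (st.1, [])
      else (st.1 ++ [g.2], st.2)) ([], palabras)
  String.ofList (PySem.Chars.join [] salida.1)

-- ===== PRECONDITION & SPEC =====
def Spec_ordenar_palabras_por_longitud (cadena : String) (out : String) : Prop := out = ordenar_palabras_por_longitud_alt cadena
instance (cadena : String) (out : String) : Decidable (Spec_ordenar_palabras_por_longitud cadena out) := by unfold Spec_ordenar_palabras_por_longitud; infer_instance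

-- ===== CLAIM (what is proved, stated in full; the proofs are below) =====
def Claim_equal_ordenar_palabras_por_longitud : Prop := ∀ (cadena : String), Dom_ordenar_palabras_por_longitud cadena → Spec_ordenar_palabras_por_longitud cadena (ordenar_palabras_por_longitud cadena)

-- ===== LEMMAS AND PROOFS =====

theorem pvRuns_nil : pvRuns [] = [] := by rw [pvRuns.eq_def]

theorem pvRuns_cons (c : Char) (rest : List Char) :
    pvRuns (c :: rest) =
      (PySem.Chars.isalnum c,
        c :: rest.takeWhile (fun d => PySem.Chars.isalnum d == PySem.Chars.isalnum c)) ::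
        pvRuns (rest.dropWhile (fun d => PySem.Chars.isalnum d == PySem.Chars.isalnum c)) := by
  rw [pvRuns.eq_def]

-- canonical token list: words as maximal alnum runs, separators one char each
def pvTokens (l : List Char) : List (List Char) :=
  match l with
  | [] => []
  | c :: rest =>
      if PySem.Chars.isalnum c then
        (c :: rest.takeWhile (fun d => PySem.Chars.isalnum d)) ::
          pvTokens (rest.dropWhile (fun d => PySem.Chars.isalnum d))
      else [c] :: pvTokens rest
termination_by l.length
decreasing_by
  · simp only [List.length_cons]
    exact Nat.lt_succ_of_le (List.length_dropWhile_le _ _)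
  · simp

theorem pvTokens_nil : pvTokens [] = [] := by rw [pvTokens.eq_def]

theorem pvTokens_cons (c : Char) (rest : List Char) :
    pvTokens (c :: rest) =
      if PySem.Chars.isalnum c then
        (c :: rest.takeWhile (fun d => PySem.Chars.isalnum d)) ::
          pvTokens (rest.dropWhile (fun d => PySem.Chars.isalnum d))
      else [c] :: pvTokens rest := by
  rw [pvTokens.eq_def]

def pvGroupTokens (g : Bool × List Char) : List (List Char) :=
  if g.1 then [g.2] else g.2.map (fun c => [c])

theorem pvTokens_sep_append (s t : List Char) (hs : ∀ c ∈ s, PySem.Chars.isalnum c = false) :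
    pvTokens (s ++ t) = s.map (fun c => [c]) ++ pvTokens t := by
  induction s with
  | nil => simp
  | cons c s ih =>
      have hc := hs c (by simp)
      rw [List.cons_append, pvTokens_cons]
      simp only [hc, Bool.false_eq_true, if_false]
      rw [ih (fun d hd => hs d (by simp [hd]))]
      simp

theorem pvTokens_eq_flat_runs_aux :
    ∀ (n : Nat) (l : List Char), l.length ≤ n →
      pvTokens l = (pvRuns l).flatMap pvGroupTokens := by
  intro n
  induction n with
  | zero =>
      intro l hl
      have : l = [] := by cases l <;> simp_all
      subst this
      simp [pvTokens_nil, pvRuns_nil]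
  | succ n ih =>
      intro l hl
      cases l with
      | nil => simp [pvTokens_nil, pvRuns_nil]
      | cons c rest =>
          rw [pvRuns_cons, pvTokens_cons, List.flatMap_cons]
          by_cases hc : PySem.Chars.isalnum c = true
          · simp only [hc, if_true, pvGroupTokens]
            have hfn : (fun d => PySem.Chars.isalnum d == true) = fun d => PySem.Chars.isalnum d := by
              funext d; cases PySem.Chars.isalnum d <;> rfl
            rw [hfn]
            rw [ih (rest.dropWhile (fun d => PySem.Chars.isalnum d))
              (le_trans (List.length_dropWhile_le _ _) (by simpa using hl))]
            simp
          · have hc' : PySem.Chars.isalnum c = false := by simpa using hc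
            simp only [hc', Bool.false_eq_true, if_false, pvGroupTokens, List.map_cons]
            have htw : ∀ d ∈ rest.takeWhile (fun d => PySem.Chars.isalnum d == false),
                PySem.Chars.isalnum d = false := by
              intro d hd
              simpa using List.mem_takeWhile_imp hd
            have hsplit : rest = rest.takeWhile (fun d => PySem.Chars.isalnum d == false) ++
                rest.dropWhile (fun d => PySem.Chars.isalnum d == false) :=
              (List.takeWhile_append_dropWhile).symm
            conv_lhs => rw [hsplit]
            rw [pvTokens_sep_append _ _ htw]
            rw [ih (rest.dropWhile (fun d => PySem.Chars.isalnum d == false))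
              (le_trans (List.length_dropWhile_le _ _) (by simpa using hl))]
            simp

theorem pvTokens_eq_flat_runs (l : List Char) :
    pvTokens l = (pvRuns l).flatMap pvGroupTokens :=
  pvTokens_eq_flat_runs_aux l.length l le_rfl

-- every run is nonempty and homogeneous for isalnum
theorem pvRuns_wf_aux :
    ∀ (n : Nat) (l : List Char), l.length ≤ n →
      ∀ g ∈ pvRuns l, g.2 ≠ [] ∧ ∀ c ∈ g.2, PySem.Chars.isalnum c = g.1 := by
  intro n
  induction n with
  | zero =>
      intro l hl
      have : l = [] := by cases l <;> simp_all
      subst this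
      simp [pvRuns_nil]
  | succ n ih =>
      intro l hl
      cases l with
      | nil => simp [pvRuns_nil]
      | cons c rest =>
          rw [pvRuns_cons]
          intro g hg
          simp only [List.mem_cons] at hg
          rcases hg with hg | hg
          · subst hg
            refine ⟨by simp, ?_⟩
            intro d hd
            simp only [List.mem_cons] at hd
            rcases hd with rfl | hd
            · rfl
            · simpa using List.mem_takeWhile_imp hd
          · exact ih (rest.dropWhile _)
              (le_trans (List.length_dropWhile_le _ _) (by simpa using hl)) g hg

theorem pvRuns_wf (l : List Char) :
    ∀ g ∈ pvRuns l, g.2 ≠ [] ∧ ∀ c ∈ g.2, PySem.Chars.isalnum c = g.1 :=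
  pvRuns_wf_aux l.length l le_rfl

-- feeding a run of alnum chars just extends palabra
theorem pvStepA_run (r : List Char) (hr : ∀ c ∈ r, PySem.Chars.isalnum c = true) :
    ∀ (t : List Char) (P : List (List Char)) (w : List Char),
      (r ++ t).foldl pvStepA (P, w) = t.foldl pvStepA (P, w ++ r) := by
  induction r with
  | nil => simp
  | cons c r ih =>
      intro t P w
      have hc := hr c (by simp)
      simp only [List.cons_append, List.foldl_cons, pvStepA, hc, if_true]
      rw [ih (fun d hd => hr d (by simp [hd])) t P (w ++ [c])]
      simp

def pvFinalize (st : List (List Char) × List Char) : List (List Char) :=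
  if st.2 ≠ [] then st.1 ++ [st.2] else st.1

theorem pvPartes_eq_tokens_aux :
    ∀ (n : Nat) (l : List Char), l.length ≤ n → ∀ P : List (List Char),
      pvFinalize (l.foldl pvStepA (P, [])) = P ++ pvTokens l := by
  intro n
  induction n with
  | zero =>
      intro l hl
      have : l = [] := by cases l <;> simp_all
      subst this
      simp [pvFinalize, pvTokens_nil]
  | succ n ih =>
      intro l hl P
      cases l with
      | nil => simp [pvFinalize, pvTokens_nil]
      | cons c rest =>
          rw [pvTokens_cons]
          by_cases hc : PySem.Chars.isalnum c = true
          · simp only [hc, if_true]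
            have hall : ∀ d ∈ c :: rest.takeWhile (fun d => PySem.Chars.isalnum d),
                PySem.Chars.isalnum d = true := by
              intro d hd
              simp only [List.mem_cons] at hd
              rcases hd with rfl | hd
              · exact hc
              · simpa using List.mem_takeWhile_imp hd
            have hsplit : c :: rest = (c :: rest.takeWhile (fun d => PySem.Chars.isalnum d)) ++
                rest.dropWhile (fun d => PySem.Chars.isalnum d) := by
              simp [List.takeWhile_append_dropWhile]
            rw [hsplit, pvStepA_run _ hall]
            set r := c :: rest.takeWhile (fun d => PySem.Chars.isalnum d) with hr
            have hrne : r ≠ [] := by simp [hr]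
            cases hdw : rest.dropWhile (fun d => PySem.Chars.isalnum d) with
            | nil => simp [pvFinalize, hrne, pvTokens_nil]
            | cons d t =>
                have hlen : t.length ≤ n := by
                  have h1 := List.length_dropWhile_le (fun d => PySem.Chars.isalnum d) rest
                  rw [hdw] at h1
                  simp only [List.length_cons] at h1 hl
                  omega
                simp only [List.foldl_cons, pvStepA]
                have hd : PySem.Chars.isalnum d = false := by
                  have := List.head_dropWhile_not (p := fun d => PySem.Chars.isalnum d) (l := rest)
                    (by simp [hdw])
                  simp only [hdw] at this
                  simpa using this
                simp only [hd, Bool.false_eq_true, if_false, List.nil_append]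
                rw [if_pos hrne, ih t hlen (P ++ [r] ++ [[d]])]
                rw [pvTokens_cons]
                simp [hd]
          · have hc' : PySem.Chars.isalnum c = false := by simpa using hc
            simp only [hc', Bool.false_eq_true, if_false, List.foldl_cons, pvStepA]
            rw [if_neg (by simp : ¬ ([] : List Char) ≠ []),
              ih rest (by simpa using hl) (P ++ [[c]])]
            simp

theorem pvPartes_eq_tokens (l : List Char) (P : List (List Char)) :
    pvFinalize (l.foldl pvStepA (P, [])) = P ++ pvTokens l :=
  pvPartes_eq_tokens_aux l.length l le_rfl P

theorem pvStrIsalnum_singleton (c : Char) :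
    PySem.Chars.strIsalnum [c] = PySem.Chars.isalnum c := by
  simp [PySem.Chars.strIsalnum]

-- filtering the tokens recovers exactly the word runs, in order
theorem pvFilter_flat (gs : List (Bool × List Char))
    (hwf : ∀ g ∈ gs, g.2 ≠ [] ∧ ∀ c ∈ g.2, PySem.Chars.isalnum c = g.1) :
    (gs.flatMap pvGroupTokens).filter (fun p => PySem.Chars.strIsalnum p) =
      (gs.filter (·.1)).map (·.2) := by
  induction gs with
  | nil => rfl
  | cons g gs ih =>
      obtain ⟨hne, hall⟩ := hwf g (by simp)
      have ih' := ih (fun g' hg' => hwf g' (by simp [hg']))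
      simp only [List.flatMap_cons, List.filter_append, ih', pvGroupTokens, List.filter_cons]
      cases hg : g.1 with
      | true =>
          have hword : PySem.Chars.strIsalnum g.2 = true := by
            simp only [PySem.Chars.strIsalnum, Bool.and_eq_true, List.all_eq_true]
            refine ⟨by simpa using hne, fun d hd => ?_⟩
            rw [hall d hd, hg]
          simp [hword]
      | false =>
          have hsep : (g.2.map (fun c => [c])).filter (fun p => PySem.Chars.strIsalnum p) = [] := by
            rw [List.filter_eq_nil_iff]
            intro p hp
            simp only [List.mem_map] at hp
            obtain ⟨c, hc, rfl⟩ := hp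
            rw [pvStrIsalnum_singleton, hall c hc, hg]
            simp
          simp [hsep]

-- the two reconstruction loops, as pure functions of the remaining input
def pvBuildA (sw : List (List Char)) : List (List Char) → Nat → List (List Char)
  | [], _ => []
  | t :: ts, i =>
      if PySem.Chars.strIsalnum t then
        ((PySem.List.pyGet? sw (i : Int)).getD []) :: pvBuildA sw ts (i + 1)
      else t :: pvBuildA sw ts i

def pvBuildB : List (Bool × List Char) → List (List Char) → List (List Char)
  | [], _ => []
  | g :: gs, ws =>
      if g.1 then
        match ws with
        | w :: ws' => w :: pvBuildB gs ws'
        | [] => pvBuildB gs []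
      else g.2 :: pvBuildB gs ws

theorem pvFoldA (sw : List (List Char)) :
    ∀ (ts : List (List Char)) (acc : List (List Char)) (i : Nat),
      (ts.foldl (fun (acc : List (List Char) × Nat) parte =>
          if PySem.Chars.strIsalnum parte then
            (acc.1 ++ [(PySem.List.pyGet? sw (acc.2 : Int)).getD []], acc.2 + 1)
          else (acc.1 ++ [parte], acc.2)) (acc, i)).1 = acc ++ pvBuildA sw ts i := by
  intro ts
  induction ts with
  | nil => simp [pvBuildA]
  | cons t ts ih =>
      intro acc i
      simp only [List.foldl_cons, pvBuildA]
      by_cases ht : PySem.Chars.strIsalnum t = true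
      · simp only [ht, if_true, ih]
        simp
      · simp only [ht, ih]
        simp [Bool.not_eq_true] at ht
        simp

theorem pvFoldB :
    ∀ (gs : List (Bool × List Char)) (acc : List (List Char)) (ws : List (List Char)),
      (gs.foldl (fun (st : List (List Char) × List (List Char)) g =>
          if g.1 then
            match st.2 with
            | w :: ws => (st.1 ++ [w], ws)
            | [] => (st.1, [])
          else (st.1 ++ [g.2], st.2)) (acc, ws)).1 = acc ++ pvBuildB gs ws := by
  intro gs
  induction gs with
  | nil => simp [pvBuildB]
  | cons g gs ih =>
      intro acc ws
      simp only [List.foldl_cons, pvBuildB]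
      cases hg : g.1 with
      | true =>
          simp only [if_true]
          cases ws with
          | nil => simpa using ih acc []
          | cons w ws' => simp [ih]
      | false => simp [ih]

theorem pvJoin_cons (x : List Char) (rest : List (List Char)) :
    PySem.Chars.join [] (x :: rest) = x ++ PySem.Chars.join [] rest := by
  cases rest with
  | nil => simp [PySem.Chars.join, List.intercalate]
  | cons y r => rw [PySem.Chars.join_cons_cons]; simp

theorem pvJoin_append (a b : List (List Char)) :
    PySem.Chars.join [] (a ++ b) = PySem.Chars.join [] a ++ PySem.Chars.join [] b := by
  induction a with
  | nil => simp [PySem.Chars.join_nil]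
  | cons x a ih => rw [List.cons_append, pvJoin_cons, pvJoin_cons, ih]; simp

theorem pvBuildA_sep (sw : List (List Char)) (s : List Char)
    (hs : ∀ c ∈ s, PySem.Chars.isalnum c = false) (ts : List (List Char)) (i : Nat) :
    pvBuildA sw (s.map (fun c => [c]) ++ ts) i = s.map (fun c => [c]) ++ pvBuildA sw ts i := by
  induction s with
  | nil => simp
  | cons c s ih =>
      have hc := hs c (by simp)
      simp only [List.map_cons, List.cons_append, pvBuildA, pvStrIsalnum_singleton, hc,
        Bool.false_eq_true, if_false]
      rw [ih (fun d hd => hs d (by simp [hd]))]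

-- the joined outputs of the two reconstructions coincide
theorem pvJoin_eq (sw : List (List Char)) (gs : List (Bool × List Char))
    (hwf : ∀ g ∈ gs, g.2 ≠ [] ∧ ∀ c ∈ g.2, PySem.Chars.isalnum c = g.1) (i : Nat) :
    PySem.Chars.join [] (pvBuildA sw (gs.flatMap pvGroupTokens) i) =
      PySem.Chars.join [] (pvBuildB gs (sw.drop i)) := by
  induction gs generalizing i with
  | nil => simp [pvBuildA, pvBuildB]
  | cons g gs ih =>
      obtain ⟨hne, hall⟩ := hwf g (by simp)
      have ih' := ih (fun g' hg' => hwf g' (by simp [hg']))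
      simp only [List.flatMap_cons, pvGroupTokens]
      cases hg : g.1 with
      | true =>
          have hword : PySem.Chars.strIsalnum g.2 = true := by
            simp only [PySem.Chars.strIsalnum, Bool.and_eq_true, List.all_eq_true]
            refine ⟨by simpa using hne, fun d hd => ?_⟩
            rw [hall d hd, hg]
          simp only [hg, if_true, List.singleton_append, pvBuildA, hword, if_true, pvBuildB]
          rw [pvJoin_cons]
          cases hdrop : sw.drop i with
          | nil =>
              have hnone : sw[i]? = none := by
                rw [← List.head?_drop, hdrop]; rfl
              have hdrop' : sw.drop (i + 1) = [] := by
                have : sw.length ≤ i := by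
                  rw [← List.drop_eq_nil_iff]; exact hdrop
                rw [List.drop_eq_nil_iff]; omega
              rw [PySem.List.pyGet?_natCast, hnone]
              rw [ih' (i + 1), hdrop']
              simp
          | cons w ws' =>
              have hsome : sw[i]? = some w := by
                rw [← List.head?_drop, hdrop]; rfl
              have hws' : sw.drop (i + 1) = ws' := by
                rw [← List.tail_drop, hdrop]
                rfl
              rw [PySem.List.pyGet?_natCast, hsome, pvJoin_cons, ih' (i + 1), hws']
              rfl
      | false =>
          have hsep : ∀ c ∈ g.2, PySem.Chars.isalnum c = false := by
            intro c hc; rw [hall c hc, hg]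
          simp only [hg, Bool.false_eq_true, if_false, pvBuildB]
          rw [pvBuildA_sep sw g.2 hsep, pvJoin_append, pvJoin_cons,
            PySem.Chars.join_nil_singletons, ih' i]

-- ===== VERDICT (by name: the statement is the Claim_ definition above) =====
theorem ordenar_palabras_por_longitud_spec : Claim_equal_ordenar_palabras_por_longitud := by
  intro cadena _
  unfold Spec_ordenar_palabras_por_longitud
  unfold ordenar_palabras_por_longitud ordenar_palabras_por_longitud_alt
  simp only []
  have hpartes : (if (cadena.toList.foldl pvStepA ([], [])).2 ≠ [] then
      (cadena.toList.foldl pvStepA ([], [])).1 ++ [(cadena.toList.foldl pvStepA ([], [])).2]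
      else (cadena.toList.foldl pvStepA ([], [])).1) = pvTokens cadena.toList := by
    have := pvPartes_eq_tokens cadena.toList []
    simpa [pvFinalize] using this
  rw [hpartes]
  rw [pvTokens_eq_flat_runs]
  rw [pvFilter_flat (pvRuns cadena.toList) (pvRuns_wf cadena.toList)]
  set sw := PySem.List.sorted (((pvRuns cadena.toList).filter (·.1)).map (·.2)) (fun w => w.length) false with hsw
  rw [pvFoldA sw _ [] 0, pvFoldB (pvRuns cadena.toList) [] sw]
  simp only [List.nil_append]
  have := pvJoin_eq sw (pvRuns cadena.toList) (pvRuns_wf cadena.toList) 0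
  rw [List.drop_zero] at this
  rw [this]
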